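-- pv_equiv track=rewrite | github.com/angel4004/SaleCheckUp-Signals-Radar | runtime/runner/review_gate.py | build_project_update_block_ru
-- ===== SOURCE A (Python) =====
-- from collections import Counter, defaultdict
-- from typing import Any, Dict, Iterable, List, Optional
--
-- def build_project_update_block_ru(
--     run_id: str,
--     source_run_id: str,
--     reviewed_items: List[Dict[str, Any]],
--     decision_counts: Counter,
-- ) -> str:
--     accept_ids = [str(x["candidate_id"]) for x in reviewed_items if x["status"] == "accept"]
--     hold_ids = [str(x["candidate_id"]) for x in reviewed_items if x["status"] == "hold"]
--     reject_ids = [str(x["candidate_id"]) for x in reviewed_items if x["status"] == "reject"]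
--
--     lines: List[str] = []
--     lines.append(f"Run `{run_id}` завершен.")
--     lines.append("")
--     lines.append(f"Источник: `{source_run_id}/validated_signals.jsonl`.")
--     lines.append(f"Review layer обработал `{len(reviewed_items)}` уникальных candidate_id.")
--     lines.append("")
--     lines.append("Итог распределения:")
--     lines.append(f"- accept: `{decision_counts.get('accept', 0)}`")
--     lines.append(f"- hold: `{decision_counts.get('hold', 0)}`")
--     lines.append(f"- reject: `{decision_counts.get('reject', 0)}`")
--     lines.append("")
--     lines.append("Управленческий смысл:")
--     lines.append("- Review layer ужесточён без redesign всего runtime contour.")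
--     lines.append("- Silent override от validator implication запрещён: divergence теперь должен быть явным.")
--     lines.append("- `hold` больше не допускается без named blocker и concrete decision-moving next step.")
--     lines.append("")
--     lines.append(f"Accepted candidate_id: {', '.join(accept_ids) if accept_ids else '—'}")
--     lines.append(f"Hold candidate_id: {', '.join(hold_ids) if hold_ids else '—'}")
--     lines.append(f"Reject candidate_id: {', '.join(reject_ids) if reject_ids else '—'}")
--     lines.append("")
--     lines.append("Следующее действие:")
--     lines.append("- Использовать `reviewed_signals.jsonl` как вход в следующий decision/research слой без размножения записей по одному candidate_id.")
--     return "\n".join(lines).strip() + "\n"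
-- ===== SOURCE B (Python) =====
-- def build_project_update_block_ru(
--     run_id,
--     source_run_id,
--     reviewed_items,
--     decision_counts,
-- ):
--     # One pass over reviewed_items instead of three filtering scans.
--     accept_ids = []
--     hold_ids = []
--     reject_ids = []
--     for x in reviewed_items:
--         status = x["status"]
--         if status == "accept":
--             accept_ids.append(str(x["candidate_id"]))
--         elif status == "hold":
--             hold_ids.append(str(x["candidate_id"]))
--         elif status == "reject":
--             reject_ids.append(str(x["candidate_id"]))
--
--     def render(ids):
--         return ", ".join(ids) if ids else "—"
--
--     # One template string instead of an appended line list + join + strip.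
--     return (
--         f"Run `{run_id}` завершен.\n"
--         "\n"
--         f"Источник: `{source_run_id}/validated_signals.jsonl`.\n"
--         f"Review layer обработал `{len(reviewed_items)}` уникальных candidate_id.\n"
--         "\n"
--         "Итог распределения:\n"
--         f"- accept: `{decision_counts.get('accept', 0)}`\n"
--         f"- hold: `{decision_counts.get('hold', 0)}`\n"
--         f"- reject: `{decision_counts.get('reject', 0)}`\n"
--         "\n"
--         "Управленческий смысл:\n"
--         "- Review layer ужесточён без redesign всего runtime contour.\n"
--         "- Silent override от validator implication запрещён: divergence теперь должен быть явным.\n"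
--         "- `hold` больше не допускается без named blocker и concrete decision-moving next step.\n"
--         "\n"
--         f"Accepted candidate_id: {render(accept_ids)}\n"
--         f"Hold candidate_id: {render(hold_ids)}\n"
--         f"Reject candidate_id: {render(reject_ids)}\n"
--         "\n"
--         "Следующее действие:\n"
--         "- Использовать `reviewed_signals.jsonl` как вход в следующий decision/research слой без размножения записей по одному candidate_id.\n"
--     )
-- ===== Notes on version B (the rewrite author's own statement) =====
-- stated objective: alternative
-- what changed: B classifies candidate ids in a single pass over reviewed_items (one status read per item, appended to one of three buckets) instead of A's three separate filter comprehensions, and emits one fixed template string instead of appending 23 lines to a list, joining and stripping.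
-- outside the precondition, e.g. on build_project_update_block_ru('r1', 'r0', [{'candidate_id': 'c'}], {}): A raises KeyError, B raises KeyError; on build_project_update_block_ru('r1', 'r0', [{'status': 'accept'}], {}): A raises KeyError, B raises KeyError
import Mathlib
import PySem

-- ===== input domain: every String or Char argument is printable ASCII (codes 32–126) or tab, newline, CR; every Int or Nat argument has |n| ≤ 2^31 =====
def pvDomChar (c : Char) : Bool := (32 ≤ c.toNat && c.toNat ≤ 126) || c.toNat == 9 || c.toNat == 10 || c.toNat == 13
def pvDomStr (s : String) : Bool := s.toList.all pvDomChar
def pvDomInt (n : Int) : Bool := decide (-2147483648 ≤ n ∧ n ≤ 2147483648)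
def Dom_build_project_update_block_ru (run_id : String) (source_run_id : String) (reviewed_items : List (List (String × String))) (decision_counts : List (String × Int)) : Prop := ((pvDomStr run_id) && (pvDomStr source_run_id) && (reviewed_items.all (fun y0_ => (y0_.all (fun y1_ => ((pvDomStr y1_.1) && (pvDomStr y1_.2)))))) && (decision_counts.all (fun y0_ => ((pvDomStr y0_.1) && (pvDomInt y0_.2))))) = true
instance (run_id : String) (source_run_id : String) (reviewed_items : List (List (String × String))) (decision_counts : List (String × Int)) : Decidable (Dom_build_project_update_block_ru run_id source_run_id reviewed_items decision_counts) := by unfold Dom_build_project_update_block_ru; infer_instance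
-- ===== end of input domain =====

set_option maxRecDepth 40000

-- B replaces A's three filtering passes over reviewed_items by a single classifying pass,
-- and the appended line list + join + strip by one fixed template (objective: simpler/alternative; same return value).

-- ===== PORT A =====
-- x[k]: first-match lookup; the default "" is only reachable outside Pre_ (Python raises KeyError there).
-- str(x["candidate_id"]) is the identity here because the item values are strings.
def pvGetItem (x : List (String × String)) (k : String) : String :=
  ((PySem.Dict.mk x).get? k).getD ""

def build_project_update_block_ru (run_id : String) (source_run_id : String) (reviewed_items : List (List (String × String))) (decision_counts : List (String × Int)) : String :=
  let accept_ids := (reviewed_items.filter (fun x => pvGetItem x "status" == "accept")).map (fun x => pvGetItem x "candidate_id")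
  let hold_ids := (reviewed_items.filter (fun x => pvGetItem x "status" == "hold")).map (fun x => pvGetItem x "candidate_id")
  let reject_ids := (reviewed_items.filter (fun x => pvGetItem x "status" == "reject")).map (fun x => pvGetItem x "candidate_id")
  let lines : List String := [
    "Run `" ++ run_id ++ "` завершен.",
    "",
    "Источник: `" ++ source_run_id ++ "/validated_signals.jsonl`.",
    "Review layer обработал `" ++ PySem.Int.toStr (reviewed_items.length : Int) ++ "` уникальных candidate_id.",
    "",
    "Итог распределения:",
    "- accept: `" ++ PySem.Int.toStr (PySem.Dict.getD (PySem.Dict.mk decision_counts) "accept" 0) ++ "`",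
    "- hold: `" ++ PySem.Int.toStr (PySem.Dict.getD (PySem.Dict.mk decision_counts) "hold" 0) ++ "`",
    "- reject: `" ++ PySem.Int.toStr (PySem.Dict.getD (PySem.Dict.mk decision_counts) "reject" 0) ++ "`",
    "",
    "Управленческий смысл:",
    "- Review layer ужесточён без redesign всего runtime contour.",
    "- Silent override от validator implication запрещён: divergence теперь должен быть явным.",
    "- `hold` больше не допускается без named blocker и concrete decision-moving next step.",
    "",
    "Accepted candidate_id: " ++ (if accept_ids.isEmpty then "—" else PySem.Str.join ", " accept_ids),
    "Hold candidate_id: " ++ (if hold_ids.isEmpty then "—" else PySem.Str.join ", " hold_ids),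
    "Reject candidate_id: " ++ (if reject_ids.isEmpty then "—" else PySem.Str.join ", " reject_ids),
    "",
    "Следующее действие:",
    "- Использовать `reviewed_signals.jsonl` как вход в следующий decision/research слой без размножения записей по одному candidate_id."]
  PySem.Str.strip (PySem.Str.join "\n" lines) ++ "\n"

-- ===== PORT B =====
-- ", ".join(ids) if ids else "—"
def pvRender (ids : List String) : String :=
  if ids.isEmpty then "—" else PySem.Str.join ", " ids

def build_project_update_block_ru_alt (run_id : String) (source_run_id : String) (reviewed_items : List (List (String × String))) (decision_counts : List (String × Int)) : String :=
  let b := reviewed_items.foldl (fun (acc : List String × List String × List String) x =>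
      let status := pvGetItem x "status"
      if status == "accept" then (acc.1 ++ [pvGetItem x "candidate_id"], acc.2.1, acc.2.2)
      else if status == "hold" then (acc.1, acc.2.1 ++ [pvGetItem x "candidate_id"], acc.2.2)
      else if status == "reject" then (acc.1, acc.2.1, acc.2.2 ++ [pvGetItem x "candidate_id"])
      else acc) ([], [], [])
  "Run `" ++
    run_id ++
    "` завершен.\n\nИсточник: `" ++
    source_run_id ++
    "/validated_signals.jsonl`.\nReview layer обработал `" ++
    PySem.Int.toStr (reviewed_items.length : Int) ++
    "` уникальных candidate_id.\n\nИтог распределения:\n- accept: `" ++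
    PySem.Int.toStr (PySem.Dict.getD (PySem.Dict.mk decision_counts) "accept" 0) ++
    "`\n- hold: `" ++
    PySem.Int.toStr (PySem.Dict.getD (PySem.Dict.mk decision_counts) "hold" 0) ++
    "`\n- reject: `" ++
    PySem.Int.toStr (PySem.Dict.getD (PySem.Dict.mk decision_counts) "reject" 0) ++
    "`\n\nУправленческий смысл:\n- Review layer ужесточён без redesign всего runtime contour.\n- Silent override от validator implication запрещён: divergence теперь должен быть явным.\n- `hold` больше не допускается без named blocker и concrete decision-moving next step.\n\nAccepted candidate_id: " ++
    pvRender b.1 ++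
    "\nHold candidate_id: " ++
    pvRender b.2.1 ++
    "\nReject candidate_id: " ++
    pvRender b.2.2 ++
    "\n\nСледующее действие:\n- Использовать `reviewed_signals.jsonl` как вход в следующий decision/research слой без размножения записей по одному candidate_id.\n"

-- ===== PRECONDITION & SPEC =====
-- Pre_ excludes exactly the items on which Python A raises KeyError: every item must carry a
-- "status" key, and a "candidate_id" key whenever its status is accept/hold/reject.
def Pre_build_project_update_block_ru (run_id : String) (source_run_id : String) (reviewed_items : List (List (String × String))) (decision_counts : List (String × Int)) : Prop :=
  ∀ x ∈ reviewed_items,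
    ((PySem.Dict.mk x).get? "status").isSome = true ∧
    (((PySem.Dict.mk x).get? "status").getD "" ∈ (["accept", "hold", "reject"] : List String) →
      ((PySem.Dict.mk x).get? "candidate_id").isSome = true)
instance (run_id : String) (source_run_id : String) (reviewed_items : List (List (String × String))) (decision_counts : List (String × Int)) : Decidable (Pre_build_project_update_block_ru run_id source_run_id reviewed_items decision_counts) := by unfold Pre_build_project_update_block_ru; infer_instance

def pvWitness_build_project_update_block_ru : String × String × (List (List (String × String))) × (List (String × Int)) :=
  ("run-2", "run-1", [[("status", "accept"), ("candidate_id", "c1")], [("status", "hold"), ("candidate_id", "c2")]], [("accept", 1), ("hold", 1)])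

def Spec_build_project_update_block_ru (run_id : String) (source_run_id : String) (reviewed_items : List (List (String × String))) (decision_counts : List (String × Int)) (out : String) : Prop := out = build_project_update_block_ru_alt run_id source_run_id reviewed_items decision_counts
instance (run_id : String) (source_run_id : String) (reviewed_items : List (List (String × String))) (decision_counts : List (String × Int)) (out : String) : Decidable (Spec_build_project_update_block_ru run_id source_run_id reviewed_items decision_counts out) := by unfold Spec_build_project_update_block_ru; infer_instance

-- ===== CLAIM =====
def Claim_equal_build_project_update_block_ru : Prop := ∀ (run_id : String) (source_run_id : String) (reviewed_items : List (List (String × String))) (decision_counts : List (String × Int)), Dom_build_project_update_block_ru run_id source_run_id reviewed_items decision_counts → Pre_build_project_update_block_ru run_id source_run_id reviewed_items decision_counts → Spec_build_project_update_block_ru run_id source_run_id reviewed_items decision_counts (build_project_update_block_ru run_id source_run_id reviewed_items decision_counts)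

-- ===== LEMMAS AND PROOFS =====

lemma pv_witness_ok : Dom_build_project_update_block_ru (pvWitness_build_project_update_block_ru.1) (pvWitness_build_project_update_block_ru.2.1) (pvWitness_build_project_update_block_ru.2.2.1) (pvWitness_build_project_update_block_ru.2.2.2) ∧ Pre_build_project_update_block_ru (pvWitness_build_project_update_block_ru.1) (pvWitness_build_project_update_block_ru.2.1) (pvWitness_build_project_update_block_ru.2.2.1) (pvWitness_build_project_update_block_ru.2.2.2) := by
  constructor <;> decide

-- B's single pass equals A's three filtering passes.
lemma pv_foldl_classify (xs : List (List (String × String))) (a h r : List String) :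
    xs.foldl (fun (acc : List String × List String × List String) x =>
      let status := pvGetItem x "status"
      if status == "accept" then (acc.1 ++ [pvGetItem x "candidate_id"], acc.2.1, acc.2.2)
      else if status == "hold" then (acc.1, acc.2.1 ++ [pvGetItem x "candidate_id"], acc.2.2)
      else if status == "reject" then (acc.1, acc.2.1, acc.2.2 ++ [pvGetItem x "candidate_id"])
      else acc) (a, h, r) =
    (a ++ (xs.filter (fun x => pvGetItem x "status" == "accept")).map (fun x => pvGetItem x "candidate_id"),
     h ++ (xs.filter (fun x => pvGetItem x "status" == "hold")).map (fun x => pvGetItem x "candidate_id"),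
     r ++ (xs.filter (fun x => pvGetItem x "status" == "reject")).map (fun x => pvGetItem x "candidate_id")) := by
  induction xs generalizing a h r with
  | nil => simp
  | cons x xs ih =>
    rw [List.foldl_cons]
    by_cases h1 : pvGetItem x "status" == "accept"
    · have h2 : ¬ (pvGetItem x "status" == "hold") = true := by simp_all
      have h3 : ¬ (pvGetItem x "status" == "reject") = true := by simp_all
      show List.foldl _ (if (pvGetItem x "status" == "accept") = true then _ else _) xs = _
      rw [if_pos h1, ih]
      simp [h1, h2, h3]
    · by_cases h2 : pvGetItem x "status" == "hold"
      · have h3 : ¬ (pvGetItem x "status" == "reject") = true := by simp_all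
        show List.foldl _ (if (pvGetItem x "status" == "accept") = true then _
          else if (pvGetItem x "status" == "hold") = true then _ else _) xs = _
        rw [if_neg h1, if_pos h2, ih]
        simp [h1, h2, h3]
      · by_cases h3 : pvGetItem x "status" == "reject"
        · show List.foldl _ (if (pvGetItem x "status" == "accept") = true then _
            else if (pvGetItem x "status" == "hold") = true then _
            else if (pvGetItem x "status" == "reject") = true then _ else _) xs = _
          rw [if_neg h1, if_neg h2, if_pos h3, ih]
          simp [h1, h2, h3]
        · show List.foldl _ (if (pvGetItem x "status" == "accept") = true then _
            else if (pvGetItem x "status" == "hold") = true then _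
            else if (pvGetItem x "status" == "reject") = true then _ else (a, h, r)) xs = _
          rw [if_neg h1, if_neg h2, if_neg h3, ih]
          simp [h1, h2, h3]

-- str.strip() is the identity on a string whose first and last characters are not whitespace.
lemma pv_chars_strip_noop (l : List Char)
    (hh : ∃ c, l.head? = some c ∧ PySem.Chars.isspace c = false)
    (hl : ∃ d, l.getLast? = some d ∧ PySem.Chars.isspace d = false) :
    PySem.Chars.strip l = l := by
  obtain ⟨c, hc0, hc⟩ := hh
  obtain ⟨t, rfl⟩ := List.head?_eq_some_iff.mp hc0
  obtain ⟨d, hd, hdn⟩ := hl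
  unfold PySem.Chars.strip PySem.Chars.lstrip PySem.Chars.rstrip
  rw [List.dropWhile_cons_of_neg (by simp [hc])]
  have hrev : (c :: t).reverse.head? = some d := by
    rw [List.head?_reverse]; exact hd
  obtain ⟨e, u, heu⟩ : ∃ e u, (c :: t).reverse = e :: u := by
    cases hrev2 : (c :: t).reverse with
    | nil => simp at hrev2
    | cons e u => exact ⟨e, u, rfl⟩
  rw [heu]
  rw [heu] at hrev
  simp at hrev
  rw [List.dropWhile_cons_of_neg (by simp [hrev ▸ hdn])]
  rw [← heu, List.reverse_reverse]

lemma pv_strip_noop_str (s : String)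
    (hh : ∃ c, s.toList.head? = some c ∧ PySem.Chars.isspace c = false)
    (hl : ∃ d, s.toList.getLast? = some d ∧ PySem.Chars.isspace d = false) :
    PySem.Str.strip s = s := by
  apply String.toList_inj.mp
  rw [PySem.Str.toList_strip]
  exact pv_chars_strip_noop _ hh hl

lemma pv_join_cons (sep a b : String) (l : List String) :
    PySem.Str.join sep (a :: b :: l) = a ++ sep ++ PySem.Str.join sep (b :: l) := by
  apply String.toList_inj.mp
  simp only [PySem.Str.toList_join, List.map_cons, PySem.Chars.join_cons_cons,
    String.toList_append]

lemma pv_join_single (sep a : String) : PySem.Str.join sep [a] = a := by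
  apply String.toList_inj.mp
  simp only [PySem.Str.toList_join, List.map_cons, List.map_nil, PySem.Chars.join_singleton]

lemma pv_gap0 (X : String) : "` завершен." ++ ("\n" ++ ("" ++ ("\n" ++ ("Источник: `" ++ (X))))) = "` завершен.\n\nИсточник: `" ++ X := by
  simp only [← String.append_assoc]; rfl

lemma pv_gap1 (X : String) : "/validated_signals.jsonl`." ++ ("\n" ++ ("Review layer обработал `" ++ (X))) = "/validated_signals.jsonl`.\nReview layer обработал `" ++ X := by
  simp only [← String.append_assoc]; rfl

lemma pv_gap2 (X : String) : "` уникальных candidate_id." ++ ("\n" ++ ("" ++ ("\n" ++ ("Итог распределения:" ++ ("\n" ++ ("- accept: `" ++ (X))))))) = "` уникальных candidate_id.\n\nИтог распределения:\n- accept: `" ++ X := by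
  simp only [← String.append_assoc]; rfl

lemma pv_gap3 (X : String) : "`" ++ ("\n" ++ ("- hold: `" ++ (X))) = "`\n- hold: `" ++ X := by
  simp only [← String.append_assoc]; rfl

lemma pv_gap4 (X : String) : "`" ++ ("\n" ++ ("- reject: `" ++ (X))) = "`\n- reject: `" ++ X := by
  simp only [← String.append_assoc]; rfl

lemma pv_gap5 (X : String) : "`" ++ ("\n" ++ ("" ++ ("\n" ++ ("Управленческий смысл:" ++ ("\n" ++ ("- Review layer ужесточён без redesign всего runtime contour." ++ ("\n" ++ ("- Silent override от validator implication запрещён: divergence теперь должен быть явным." ++ ("\n" ++ ("- `hold` больше не допускается без named blocker и concrete decision-moving next step." ++ ("\n" ++ ("" ++ ("\n" ++ ("Accepted candidate_id: " ++ (X))))))))))))))) = "`\n\nУправленческий смысл:\n- Review layer ужесточён без redesign всего runtime contour.\n- Silent override от validator implication запрещён: divergence теперь должен быть явным.\n- `hold` больше не допускается без named blocker и concrete decision-moving next step.\n\nAccepted candidate_id: " ++ X := by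
  simp only [← String.append_assoc]; rfl

lemma pv_gap6 (X : String) : "\n" ++ ("Hold candidate_id: " ++ (X)) = "\nHold candidate_id: " ++ X := by
  simp only [← String.append_assoc]; rfl

lemma pv_gap7 (X : String) : "\n" ++ ("Reject candidate_id: " ++ (X)) = "\nReject candidate_id: " ++ X := by
  simp only [← String.append_assoc]; rfl

lemma pv_gap8 : "\n" ++ ("" ++ ("\n" ++ ("Следующее действие:" ++ ("\n" ++ ("- Использовать `reviewed_signals.jsonl` как вход в следующий decision/research слой без размножения записей по одному candidate_id." ++ ("\n")))))) = "\n\nСледующее действие:\n- Использовать `reviewed_signals.jsonl` как вход в следующий decision/research слой без размножения записей по одному candidate_id.\n" := by rfl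

-- The joined, stripped line list of A is B's template, for arbitrary filler strings.
set_option maxHeartbeats 1000000 in
lemma pv_assemble (rid srid n cA cH cR iA iH iR : String) :
    PySem.Str.strip (PySem.Str.join "\n" [
    "Run `" ++ rid ++ "` завершен.",
    "",
    "Источник: `" ++ srid ++ "/validated_signals.jsonl`.",
    "Review layer обработал `" ++ n ++ "` уникальных candidate_id.",
    "",
    "Итог распределения:",
    "- accept: `" ++ cA ++ "`",
    "- hold: `" ++ cH ++ "`",
    "- reject: `" ++ cR ++ "`",
    "",
    "Управленческий смысл:",
    "- Review layer ужесточён без redesign всего runtime contour.",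
    "- Silent override от validator implication запрещён: divergence теперь должен быть явным.",
    "- `hold` больше не допускается без named blocker и concrete decision-moving next step.",
    "",
    "Accepted candidate_id: " ++ iA,
    "Hold candidate_id: " ++ iH,
    "Reject candidate_id: " ++ iR,
    "",
    "Следующее действие:",
    "- Использовать `reviewed_signals.jsonl` как вход в следующий decision/research слой без размножения записей по одному candidate_id."]) ++ "\n"
    =
    "Run `" ++
    rid ++
    "` завершен.\n\nИсточник: `" ++
    srid ++
    "/validated_signals.jsonl`.\nReview layer обработал `" ++
    n ++
    "` уникальных candidate_id.\n\nИтог распределения:\n- accept: `" ++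
    cA ++
    "`\n- hold: `" ++
    cH ++
    "`\n- reject: `" ++
    cR ++
    "`\n\nУправленческий смысл:\n- Review layer ужесточён без redesign всего runtime contour.\n- Silent override от validator implication запрещён: divergence теперь должен быть явным.\n- `hold` больше не допускается без named blocker и concrete decision-moving next step.\n\nAccepted candidate_id: " ++
    iA ++
    "\nHold candidate_id: " ++
    iH ++
    "\nReject candidate_id: " ++
    iR ++
    "\n\nСледующее действие:\n- Использовать `reviewed_signals.jsonl` как вход в следующий decision/research слой без размножения записей по одному candidate_id.\n" := by
  simp only [pv_join_cons, pv_join_single]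
  rw [pv_strip_noop_str]
  · simp only [String.append_assoc]
    rw [pv_gap0, pv_gap1, pv_gap2, pv_gap3, pv_gap4, pv_gap5, pv_gap6, pv_gap7, pv_gap8]
  · refine ⟨'R', ?_, rfl⟩
    simp only [String.toList_append, List.head?_append]
    rfl
  · refine ⟨'.', ?_, rfl⟩
    simp only [String.toList_append, List.getLast?_append]
    rfl

-- ===== VERDICT =====
theorem build_project_update_block_ru_spec : Claim_equal_build_project_update_block_ru := by
  intro run_id source_run_id reviewed_items decision_counts _ _
  unfold Spec_build_project_update_block_ru
  simp only [build_project_update_block_ru, build_project_update_block_ru_alt]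
  rw [pv_foldl_classify]
  exact pv_assemble _ _ _ _ _ _ _ _ _
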